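-- pv_equiv track=rewrite | github.com/mohAhmadRaza/LeetCode-Python-Project-Tasks | Min_Max_Game.py | minMaxGame
-- ===== SOURCE A (Python) =====
-- from typing import List
--
-- def minMaxGame(nums: List[int]) -> int:
--     length = len(nums)
--     while length > 1:
--         newArray = [0] * (length // 2)
--
--         for i in range(length // 2):
--             if i % 2 == 0:
--                 newArray[i] = min(nums[2 * i], nums[2 * i + 1])
--             else:
--                 newArray[i] = max(nums[2 * i], nums[2 * i + 1])
--
--         length = len(newArray)
--         nums = newArray
--
--     return nums[0]
-- ===== SOURCE B (Python) =====
-- def _pairs(nums):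
--     # consecutive pairs ((n0,n1), (n2,n3), ...); a leftover element is dropped
--     it = iter(nums)
--     return list(zip(it, it))
--
-- def minMaxGame(nums):
--     if len(nums) <= 1:
--         return nums[0]
--     nxt = [min(a, b) if i % 2 == 0 else max(a, b)
--            for i, (a, b) in enumerate(_pairs(nums))]
--     return minMaxGame(nxt)
-- ===== Notes on version B (the rewrite author's own statement) =====
-- stated objective: alternative
-- what changed: Replaces the iterative while-loop with index-preallocated array writes by structural recursion: a helper pairs up consecutive elements, one comprehension over enumerate applies min/max by parity, and the function recurses on the halved list.
import Mathlib
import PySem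

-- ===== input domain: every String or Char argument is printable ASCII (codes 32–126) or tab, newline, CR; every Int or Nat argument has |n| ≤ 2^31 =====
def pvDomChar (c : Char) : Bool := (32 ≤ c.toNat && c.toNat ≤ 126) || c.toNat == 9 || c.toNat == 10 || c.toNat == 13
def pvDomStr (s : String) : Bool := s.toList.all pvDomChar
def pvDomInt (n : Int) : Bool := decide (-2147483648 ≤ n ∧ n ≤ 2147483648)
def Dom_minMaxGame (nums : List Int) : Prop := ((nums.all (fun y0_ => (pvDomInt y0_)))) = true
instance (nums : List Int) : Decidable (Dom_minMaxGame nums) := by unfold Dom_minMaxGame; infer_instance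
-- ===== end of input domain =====

-- B is an alternative decomposition (structural recursion over pairs instead of an
-- iterative loop writing into a preallocated array by index); same cost, same values.

-- ===== PORT A =====
-- one round of A's while loop: newArray = [0]*(length//2); for i in range(length//2): …
-- length//2 on the Nat nums.length is exact (nonnegative); all pyGetD/pySetD indices are
-- provably in range here, so the defaults are never read
def roundA (nums : List Int) : List Int :=
  let newArray : List Int := List.replicate (nums.length / 2) 0
  (PySem.List.pyRange 0 ((nums.length / 2 : Nat) : Int) 1).foldl
    (fun arr i =>
      if PySem.Int.mod i 2 = 0 then
        PySem.List.pySetD arr i (min (PySem.List.pyGetD nums (2 * i) 0) (PySem.List.pyGetD nums (2 * i + 1) 0))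
      else
        PySem.List.pySetD arr i (max (PySem.List.pyGetD nums (2 * i) 0) (PySem.List.pyGetD nums (2 * i + 1) 0)))
    newArray

-- termination helper for the port: each round halves the length
theorem length_roundA (nums : List Int) : (roundA nums).length = nums.length / 2 := by
  unfold roundA
  have h : ∀ (l : List Int) (init : List Int),
      (l.foldl (fun arr i =>
        if PySem.Int.mod i 2 = 0 then
          PySem.List.pySetD arr i (min (PySem.List.pyGetD nums (2 * i) 0) (PySem.List.pyGetD nums (2 * i + 1) 0))
        else
          PySem.List.pySetD arr i (max (PySem.List.pyGetD nums (2 * i) 0) (PySem.List.pyGetD nums (2 * i + 1) 0)))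
        init).length = init.length := by
    intro l
    induction l with
    | nil => intro init; rfl
    | cons x xs ih =>
      intro init
      simp only [List.foldl_cons]
      rw [ih]
      split <;> rw [PySem.List.length_pySetD]
  rw [h]
  simp

def minMaxGame (nums : List Int) : Int :=
  if nums.length > 1 then
    minMaxGame (roundA nums)
  else
    nums.headD 0   -- nums[0]; Python raises IndexError on [], excluded by Pre_
termination_by nums.length
decreasing_by simp only [length_roundA]; omega

-- ===== PORT B =====
-- _pairs = list(zip(it, it)): hand port, exact — consecutive pairs, leftover element dropped
def pairsB : List Int → List (Int × Int)
  | a :: b :: rest => (a, b) :: pairsB rest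
  | _ => []

theorem length_pairsB (nums : List Int) : (pairsB nums).length = nums.length / 2 := by
  induction nums using pairsB.induct with
  | case1 a b rest ih => simp [pairsB, ih]; omega
  | case2 l h1 =>
    match l, h1 with
    | [], _ => rfl
    | [a], _ => simp [pairsB]
    | a :: b :: rest, h => exact (h a b rest rfl).elim

def roundB (nums : List Int) : List Int :=
  (PySem.List.enumerate (pairsB nums) 0).map
    (fun p => if PySem.Int.mod p.1 2 = 0 then min p.2.1 p.2.2 else max p.2.1 p.2.2)

theorem length_roundB (nums : List Int) : (roundB nums).length = nums.length / 2 := by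
  simp [roundB, PySem.List.length_enumerate, length_pairsB]

def minMaxGame_alt (nums : List Int) : Int :=
  if nums.length ≤ 1 then
    nums.headD 0   -- nums[0]; Python raises IndexError on [], excluded by Pre_
  else
    minMaxGame_alt (roundB nums)
termination_by nums.length
decreasing_by simp only [length_roundB]; omega

-- ===== PRECONDITION & SPEC =====
-- Pre_ excludes only the empty list, on which the Python A raises IndexError (nums[0]).
def Pre_minMaxGame (nums : List Int) : Prop := nums ≠ []
instance (nums : List Int) : Decidable (Pre_minMaxGame nums) := by unfold Pre_minMaxGame; infer_instance
def pvWitness_minMaxGame : List Int := [1, 3, 5, 2]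

def Spec_minMaxGame (nums : List Int) (out : Int) : Prop := out = minMaxGame_alt nums
instance (nums : List Int) (out : Int) : Decidable (Spec_minMaxGame nums out) := by unfold Spec_minMaxGame; infer_instance

-- ===== CLAIM (what is proved, stated in full; the proofs are below) =====
def Claim_equal_minMaxGame : Prop := ∀ (nums : List Int), Dom_minMaxGame nums → Pre_minMaxGame nums → Spec_minMaxGame nums (minMaxGame nums)

-- ===== LEMMAS AND PROOFS =====

-- canonical structural form of one round, with k the running parity index
def mm : Int → List Int → List Int
  | k, a :: b :: rest => (if PySem.Int.mod k 2 = 0 then min a b else max a b) :: mm (k + 1) rest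
  | _, _ => []

-- A's foldl of index-writes into a preallocated list materialises the map over range
theorem foldl_pySetD_range (f : Int → Int) :
    ∀ (h : Nat) (init : List Int), h ≤ init.length →
      (PySem.List.pyRange 0 (h : Int) 1).foldl
        (fun arr i => PySem.List.pySetD arr i (f i)) init
      = (List.range h).map (fun (i : Nat) => f (i : Int)) ++ init.drop h := by
  intro h
  induction h with
  | zero => intro init _; simp
  | succ n ih =>
    intro init hle
    have hcast : ((n + 1 : Nat) : Int) = (n : Int) + 1 := by push_cast; ring
    rw [hcast, PySem.List.pyRange_one_succ_right (by positivity), List.foldl_append]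
    rw [ih init (by omega)]
    simp only [List.foldl_cons, List.foldl_nil, PySem.List.pySetD_natCast]
    have hn : n < init.length := by omega
    have hdrop : init.drop n = init[n] :: init.drop (n + 1) := List.drop_eq_getElem_cons hn
    rw [hdrop]
    have hlen : ((List.range n).map (fun (i : Nat) => f (i : Int))).length = n := by simp
    rw [List.set_append_right _ _ (by omega)]
    simp only [hlen, Nat.sub_self, List.set_cons_zero]
    simp [List.range_succ]

-- the range-indexed form equals the structural form, for any parity offset k
theorem map_range_eq_mm :
    ∀ (nums : List Int) (k : Int),
      (List.range (nums.length / 2)).map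
        (fun (i : Nat) => if PySem.Int.mod (k + (i : Int)) 2 = 0
                  then min (PySem.List.pyGetD nums (2 * (i : Int)) 0) (PySem.List.pyGetD nums (2 * (i : Int) + 1) 0)
                  else max (PySem.List.pyGetD nums (2 * (i : Int)) 0) (PySem.List.pyGetD nums (2 * (i : Int) + 1) 0))
      = mm k nums := by
  intro nums
  induction nums using pairsB.induct with
  | case1 a b rest ih =>
    intro k
    have hlen : (a :: b :: rest).length / 2 = rest.length / 2 + 1 := by
      simp [List.length_cons]; omega
    rw [hlen, List.range_succ_eq_map, List.map_cons, List.map_map]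
    show _ :: _ = mm k (a :: b :: rest)
    rw [mm]
    congr 1
    · have hb : PySem.List.pyGetD (a :: b :: rest) 1 0 = b := by
        rw [show (1 : Int) = ((1 : Nat) : Int) from rfl, PySem.List.pyGetD_natCast]
        simp [List.getD]
      norm_num [hb, PySem.List.pyGetD_natCast]
    · rw [← ih (k + 1)]
      apply List.map_congr_left
      intro i _
      have hk : k + ((i + 1 : Nat) : Int) = (k + 1) + (i : Int) := by push_cast; ring
      have hL1 : (2 : Int) * ((i + 1 : Nat) : Int) + 1 = ((2 * i + 3 : Nat) : Int) := by push_cast; ring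
      have hL : (2 : Int) * ((i + 1 : Nat) : Int) = ((2 * i + 2 : Nat) : Int) := by push_cast; ring
      have hR1 : (2 : Int) * ((i : Nat) : Int) + 1 = ((2 * i + 1 : Nat) : Int) := by push_cast; ring
      have hR : (2 : Int) * ((i : Nat) : Int) = ((2 * i : Nat) : Int) := by push_cast; ring
      simp only [Function.comp]
      rw [hk, hL1, hL, hR1, hR]
      simp only [PySem.List.pyGetD_natCast]
      simp [List.getD]
  | case2 l h1 =>
    intro k
    match l, h1 with
    | [], _ => simp [mm]
    | [a], _ => simp [mm]
    | a :: b :: rest, h => exact (h a b rest rfl).elim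

theorem roundA_eq_mm (nums : List Int) : roundA nums = mm 0 nums := by
  unfold roundA
  have hstep : (fun (arr : List Int) (i : Int) =>
      if PySem.Int.mod i 2 = 0 then
        PySem.List.pySetD arr i (min (PySem.List.pyGetD nums (2 * i) 0) (PySem.List.pyGetD nums (2 * i + 1) 0))
      else
        PySem.List.pySetD arr i (max (PySem.List.pyGetD nums (2 * i) 0) (PySem.List.pyGetD nums (2 * i + 1) 0)))
      = fun arr i => PySem.List.pySetD arr i
          (if PySem.Int.mod i 2 = 0
           then min (PySem.List.pyGetD nums (2 * i) 0) (PySem.List.pyGetD nums (2 * i + 1) 0)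
           else max (PySem.List.pyGetD nums (2 * i) 0) (PySem.List.pyGetD nums (2 * i + 1) 0)) := by
    funext arr i; split <;> rfl
  rw [hstep, foldl_pySetD_range _ (nums.length / 2) _ (by simp)]
  rw [List.drop_of_length_le (by simp), List.append_nil]
  rw [← map_range_eq_mm nums 0]
  apply List.map_congr_left
  intro i _
  simp

theorem enumerate_pairsB_eq_mm :
    ∀ (nums : List Int) (k : Int),
      (PySem.List.enumerate (pairsB nums) k).map
        (fun p => if PySem.Int.mod p.1 2 = 0 then min p.2.1 p.2.2 else max p.2.1 p.2.2)
      = mm k nums := by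
  intro nums
  induction nums using pairsB.induct with
  | case1 a b rest ih =>
    intro k
    rw [pairsB, PySem.List.enumerate_cons, List.map_cons, ih (k + 1), mm]
  | case2 l h1 =>
    intro k
    match l, h1 with
    | [], _ => rfl
    | [a], _ => rfl
    | a :: b :: rest, h => exact (h a b rest rfl).elim

theorem roundB_eq_mm (nums : List Int) : roundB nums = mm 0 nums := by
  unfold roundB; exact enumerate_pairsB_eq_mm nums 0

theorem rounds_eq (nums : List Int) : roundA nums = roundB nums := by
  rw [roundA_eq_mm, roundB_eq_mm]

theorem minMaxGame_eq_alt : ∀ (nums : List Int), minMaxGame nums = minMaxGame_alt nums := by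
  intro nums
  induction hn : nums.length using Nat.strong_induction_on generalizing nums with
  | _ n ih =>
    rw [minMaxGame, minMaxGame_alt]
    by_cases h : nums.length > 1
    · rw [if_pos h, if_neg (by omega), rounds_eq]
      exact ih ((roundB nums).length) (by rw [length_roundB]; omega) _ rfl
    · rw [if_neg h, if_pos (by omega)]

-- ===== VERDICT (by name: the statement is the Claim_ definition above) =====
theorem minMaxGame_spec : Claim_equal_minMaxGame := by
  intro nums _ _
  exact minMaxGame_eq_alt nums
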